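-- pv_equiv track=rewrite | github.com/xosecaas/practica-algortimos | codigo_completo_1.py | secuencia_hibbard
-- ===== SOURCE A (Python) =====
-- def secuencia_hibbard(n):
--     sec = []
--     k = 1
--     while True:
--         incremento = 2**k - 1
--         if incremento > n // 2:
--             break
--         sec.append(incremento)
--         k += 1
--     if not sec or sec[0] != 1:
--         if 1 not in sec:
--              sec.append(1)
--         sec = sorted(list(set(sec)))
--     return sec[::-1]
-- ===== SOURCE B (Python) =====
-- def secuencia_hibbard(n):
--     limit = n // 2
--     if limit < 1:
--         return [1]
--     kmax = (limit + 1).bit_length() - 1  # floor(log2(limit+1))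
--     return [2 ** k - 1 for k in range(kmax, 0, -1)]
-- ===== Notes on version B (the rewrite author's own statement) =====
-- stated objective: simpler
-- what changed: B computes the largest exponent in closed form with bit_length and emits the descending Hibbard list directly, replacing A's increment-search loop and its set/sort/reverse post-processing.
import Mathlib
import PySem

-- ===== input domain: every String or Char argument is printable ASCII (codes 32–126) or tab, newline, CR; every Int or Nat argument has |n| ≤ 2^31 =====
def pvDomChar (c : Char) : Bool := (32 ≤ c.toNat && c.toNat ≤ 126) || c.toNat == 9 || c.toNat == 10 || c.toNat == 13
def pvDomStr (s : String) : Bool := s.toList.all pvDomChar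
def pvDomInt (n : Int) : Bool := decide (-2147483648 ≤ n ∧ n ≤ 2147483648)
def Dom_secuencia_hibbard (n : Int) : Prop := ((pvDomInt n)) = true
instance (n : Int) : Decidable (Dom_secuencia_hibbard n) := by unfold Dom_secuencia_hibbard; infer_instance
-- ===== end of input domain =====

-- B replaces A's increment-search loop plus set/sort/reverse post-processing by a closed-form
-- bit_length exponent and a direct descending list (objective: simpler).


-- ===== PORT A =====
-- the 'while True' loop: k starts at 1, appends 2^k-1 while it is ≤ n//2
def pvHibLoop (lim : Int) (k : Nat) (sec : List Int) : List Int :=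
  let inc : Int := 2 ^ k - 1
  if inc > lim then sec
  else pvHibLoop lim (k + 1) (sec ++ [inc])
termination_by (lim + 2 - 2 ^ k).toNat
decreasing_by
  have h1 : (0:Int) < 2 ^ k := by positivity
  omega


def secuencia_hibbard (n : Int) : List Int :=
  let sec := pvHibLoop (PySem.Int.floordiv n 2) 1 []
  let sec :=
    if sec = [] ∨ PySem.List.pyGetD sec 0 0 ≠ 1 then
      let sec := if ¬ (1 ∈ sec) then sec ++ [1] else sec
      PySem.List.sorted (PySem.Set.ofList sec) (fun x => x) false
    else sec
  sec.reverse  -- sec[::-1]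

-- ===== PORT B =====
def secuencia_hibbard_alt (n : Int) : List Int :=
  let limit := PySem.Int.floordiv n 2
  if limit < 1 then [1]
  else
    -- (limit+1).bit_length() - 1 = Nat.log2 (limit+1)  (limit+1 ≥ 2 here)
    let kmax : Nat := Nat.log2 (limit + 1).toNat
    (PySem.List.pyRange (kmax : Int) 0 (-1)).map (fun k => 2 ^ k.toNat - 1)

-- ===== PRECONDITION & SPEC =====
def Spec_secuencia_hibbard (n : Int) (out : List Int) : Prop := out = secuencia_hibbard_alt n
instance (n : Int) (out : List Int) : Decidable (Spec_secuencia_hibbard n out) := by unfold Spec_secuencia_hibbard; infer_instance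

-- ===== CLAIM (what is proved, stated in full; the proofs are below) =====
def Claim_equal_secuencia_hibbard : Prop := ∀ (n : Int), Dom_secuencia_hibbard n → Spec_secuencia_hibbard n (secuencia_hibbard n)

-- ===== LEMMAS AND PROOFS =====

-- the loop appends exactly the increments for exponents k, k+1, …, K
theorem pvHibLoop_spec (lim : Int) (K : Nat) (hKle : (2:Int) ^ K ≤ lim + 1)
    (hK : (2:Int) ^ (K + 1) > lim + 1) :
    ∀ (m k : Nat) (sec : List Int), K + 1 - k = m →
      pvHibLoop lim k sec = sec ++ (List.range' k (K + 1 - k)).map (fun j => (2:Int) ^ j - 1) := by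
  intro m
  induction m with
  | zero =>
    intro k sec hm
    have hk : K + 1 ≤ k := by omega
    have hmono : (2:Int) ^ (K + 1) ≤ 2 ^ k := pow_le_pow_right₀ (by norm_num) hk
    rw [pvHibLoop]
    simp only [if_pos (by omega : (2:Int) ^ k - 1 > lim)]
    simp [hm]
  | succ m ih =>
    intro k sec hm
    have hk : k ≤ K := by omega
    have hle' : (2:Int) ^ k ≤ lim + 1 :=
      le_trans (pow_le_pow_right₀ (by norm_num) hk) hKle
    rw [pvHibLoop]
    simp only [if_neg (by omega : ¬ ((2:Int) ^ k - 1 > lim))]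
    rw [ih (k+1) (sec ++ [2 ^ k - 1]) (by omega)]
    have hr : List.range' k (K + 1 - k) = k :: List.range' (k+1) (K - k) := by
      have h0 : K + 1 - k = (K - k) + 1 := by omega
      rw [h0, List.range'_succ]
    rw [hr]
    simp [show K + 1 - (k+1) = K - k by omega]

theorem secuencia_hibbard_spec : Claim_equal_secuencia_hibbard := by
  unfold Claim_equal_secuencia_hibbard Spec_secuencia_hibbard
  intro n _
  unfold secuencia_hibbard secuencia_hibbard_alt
  set lim := PySem.Int.floordiv n 2 with hlim
  by_cases h : lim < 1
  · have hloop : pvHibLoop lim 1 [] = [] := by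
      rw [pvHibLoop]
      simp only [pow_one]
      rw [if_pos (by omega : (2:Int) - 1 > lim)]
    simp only [hloop, if_pos h]
    decide
  · push Not at h
    set M := (lim + 1).toNat with hM
    have hM2 : 2 ≤ M := by omega
    have hMc : (M : Int) = lim + 1 := by omega
    set K := Nat.log2 M with hKdef
    have h1 : (2:Int) ^ K ≤ lim + 1 := by
      have hle := Nat.log2_self_le (by omega : M ≠ 0)
      have : ((2 ^ K : Nat) : Int) ≤ (M : Int) := by exact_mod_cast hle
      push_cast at this; omega
    have h2 : lim + 1 < (2:Int) ^ (K + 1) := by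
      have hlt := Nat.lt_log2_self (n := M)
      have : (M : Int) < ((2 ^ (K + 1) : Nat) : Int) := by exact_mod_cast hlt
      push_cast at this; omega
    have hK1 : 1 ≤ K := (Nat.le_log2 (by omega : M ≠ 0)).mpr (by simpa using hM2)
    have hloop : pvHibLoop lim 1 [] =
        (List.range' 1 K).map (fun j => (2:Int) ^ j - 1) := by
      have := pvHibLoop_spec lim K h1 h2 K 1 [] (by omega)
      simpa using this
    have hcons : List.range' 1 K = 1 :: List.range' 2 (K - 1) := by
      have h0 : K = (K - 1) + 1 := by omega
      rw [h0, List.range'_succ]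
      simp [show K - 1 + 1 - 1 = K - 1 by omega]
    have hcond : ¬ ((List.range' 1 K).map (fun j => (2:Int) ^ j - 1) = [] ∨
        PySem.List.pyGetD ((List.range' 1 K).map (fun j => (2:Int) ^ j - 1)) 0 0 ≠ 1) := by
      rw [hcons]; simp [PySem.List.pyGetD]
    simp only [hloop, if_neg hcond, if_neg (by omega : ¬ lim < 1)]
    -- B side: rewrite the countdown range as a reversed ascending range
    rw [PySem.List.pyRange_neg_one_eq_reverse, List.map_reverse]
    congr 1
    rw [PySem.List.pyRange_one, List.range'_eq_map_range, List.map_map, List.map_map]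
    have hKeq : K = (lim + 1).toNat.log2 := by rw [hKdef, hM]
    have hlen : (((lim + 1).toNat.log2 : Int) + 1 - (0 + 1)).toNat = K := by omega
    rw [hlen]
    apply List.map_congr_left
    intro j hj
    simp only [Function.comp_apply]
    have ht : ((0:Int) + 1 + (j:Int)).toNat = 1 + j := by omega
    rw [ht]
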